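-- pv_equiv track=rewrite | github.com/bobopearls/systolic_array_accel | sim/testbench.py | generate_sequential_array
-- ===== SOURCE A (Python) =====
-- def generate_sequential_array(input_size, precision):
--     max_value = 1 << precision
--     total_elements = input_size * input_size
--     array_1d = [(i+1) % max_value for i in range(total_elements)]
--
--     array_2d = []
--     for row_index in range(input_size):
--         start = row_index * input_size
--         end = start + input_size
--         array_2d.append(array_1d[start:end])
--
--     return array_2d
-- ===== SOURCE B (Python) =====
-- def generate_sequential_array(input_size, precision):
--     max_value = 1 << precision
--     return [[(r * input_size + c + 1) % max_value for c in range(input_size)]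
--             for r in range(input_size)]
-- ===== Notes on version B (the rewrite author's own statement) =====
-- stated objective: simpler
-- what changed: B drops the intermediate flat 1D buffer and the slicing pass, computing each cell directly from its (row, column) coordinates as (r*n + c + 1) % (1 << precision) in one nested comprehension.
import Mathlib
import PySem

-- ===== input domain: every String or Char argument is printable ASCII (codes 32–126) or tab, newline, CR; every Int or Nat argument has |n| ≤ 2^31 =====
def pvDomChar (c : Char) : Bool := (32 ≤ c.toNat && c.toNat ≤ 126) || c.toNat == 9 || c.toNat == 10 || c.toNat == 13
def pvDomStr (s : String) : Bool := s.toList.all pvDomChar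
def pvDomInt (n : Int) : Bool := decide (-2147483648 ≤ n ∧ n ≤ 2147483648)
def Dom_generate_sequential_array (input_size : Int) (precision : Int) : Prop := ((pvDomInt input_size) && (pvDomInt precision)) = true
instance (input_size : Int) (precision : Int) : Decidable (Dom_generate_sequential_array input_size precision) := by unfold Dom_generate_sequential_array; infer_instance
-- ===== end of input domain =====

-- B replaces A's flat 1D buffer + slicing with direct per-cell index arithmetic (simpler decomposition, same cost).

-- ===== PORT A =====
def generate_sequential_array (input_size : Int) (precision : Int) : List (List Int) :=
  let max_value : Int := 1 <<< precision.toNat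
  let total_elements := input_size * input_size
  let array_1d := (PySem.List.pyRange 0 total_elements 1).map (fun i => PySem.Int.mod (i + 1) max_value)
  (PySem.List.pyRange 0 input_size 1).foldl
    (fun array_2d row_index =>
      let start := row_index * input_size
      let stop := start + input_size
      array_2d ++ [PySem.List.slice array_1d (some start) (some stop)]) []

-- ===== PORT B =====
def generate_sequential_array_alt (input_size : Int) (precision : Int) : List (List Int) :=
  let max_value : Int := 1 <<< precision.toNat
  (PySem.List.pyRange 0 input_size 1).map
    (fun r => (PySem.List.pyRange 0 input_size 1).map
      (fun c => PySem.Int.mod (r * input_size + c + 1) max_value))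

-- ===== PRECONDITION & SPEC =====
-- Python's '1 << precision' raises ValueError for negative precision (in both A and B).
def Pre_generate_sequential_array (input_size : Int) (precision : Int) : Prop := 0 ≤ precision
instance (input_size : Int) (precision : Int) : Decidable (Pre_generate_sequential_array input_size precision) := by unfold Pre_generate_sequential_array; infer_instance
def pvWitness_generate_sequential_array : Int × Int := (3, 2)

def Spec_generate_sequential_array (input_size : Int) (precision : Int) (out : List (List Int)) : Prop := out = generate_sequential_array_alt input_size precision
instance (input_size : Int) (precision : Int) (out : List (List Int)) : Decidable (Spec_generate_sequential_array input_size precision out) := by unfold Spec_generate_sequential_array; infer_instance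

-- ===== CLAIM (what is proved, stated in full; the proofs are below) =====
def Claim_equal_generate_sequential_array : Prop := ∀ (input_size : Int) (precision : Int), Dom_generate_sequential_array input_size precision → Pre_generate_sequential_array input_size precision → Spec_generate_sequential_array input_size precision (generate_sequential_array input_size precision)

-- ===== LEMMAS AND PROOFS =====

-- A's row r (a slice of the flat buffer) equals B's directly computed row.
lemma row_eq (n M r : Int) (hr0 : 0 ≤ r) (hrn : r < n) :
    PySem.List.slice
      ((PySem.List.pyRange 0 (n * n) 1).map (fun i => PySem.Int.mod (i + 1) M))
      (some (r * n)) (some (r * n + n))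
    = (PySem.List.pyRange 0 n 1).map (fun c => PySem.Int.mod (r * n + c + 1) M) := by
  have hn : 0 < n := lt_of_le_of_lt hr0 hrn
  have hrn0 : 0 ≤ r * n := mul_nonneg hr0 hn.le
  have hub : r * n + n ≤ n * n := by nlinarith
  rw [PySem.List.slice_toNat _ hrn0 (show (0:Int) ≤ r * n + n by linarith)]
  rw [PySem.List.pyRange_one, PySem.List.pyRange_one]
  simp only [List.map_map, sub_zero]
  apply List.ext_getElem
  · simp only [List.length_map, List.length_take, List.length_drop, List.length_range]
    omega
  · intro i h1 h2
    simp only [List.getElem_map, List.getElem_take, List.getElem_drop, List.getElem_range,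
      Function.comp_apply]
    congr 1
    push_cast
    omega

-- ===== VERDICT (by name: the statement is the Claim_ definition above) =====
theorem generate_sequential_array_spec : Claim_equal_generate_sequential_array := by
  intro n p _ _
  unfold Spec_generate_sequential_array generate_sequential_array generate_sequential_array_alt
  simp only
  rw [PySem.List.foldl_append_singleton_eq_map]
  apply List.map_congr_left
  intro r hr
  rw [PySem.List.mem_pyRange_one] at hr
  exact row_eq n _ r hr.1 hr.2
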